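-- pv_equiv track=rewrite | github.com/Natalisa/process-modeling | MarkovСhains.py | addDist
-- ===== SOURCE A (Python) =====
-- def addDist(distribution, run, state):
--     """
--     корректировка матрицы распределения
--     distribution - матрица
--     run - состояние из которого пришли
--     state - состояние в которое перешли
--     """
--     #если из такого состояния еще не было
--     if distribution.get(run) is None:
--         distribution[run] = [[state, 1]]
--         return distribution
--     else:
--         y = [x for x in distribution.get(run) if x[0] == state]
--         #если в такое состояние еще не переходили
--         if y == []:
--             tmp = distribution.get(run)
--             tmp.append([state,1])
--             distribution[run] = tmp
--             return distribution
--
--         tmp = []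
--         for i in distribution.get(run):
--             if i[0] == state:
--                 tmp.append([state, i[1]+1])
--             else:
--                 tmp.append(i)
--         distribution[run] = tmp
--     return distribution
-- ===== SOURCE B (Python) =====
-- # Single early-returning in-place pass; mutates `distribution` like A does (return value is what is compared).
-- def addDist(distribution, run, state):
--     pairs = distribution.get(run)
--     if pairs is None:
--         distribution[run] = [[state, 1]]
--         return distribution
--     for pair in pairs:
--         if pair[0] == state:
--             pair[1] += 1
--             return distribution
--     pairs.append([state, 1])
--     return distribution
-- ===== Notes on version B (the rewrite author's own statement) =====
-- stated objective: simpler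
-- what changed: Replaces A's filter-based existence check plus a separate full rebuild loop with one early-returning in-place pass that increments the first matching pair or appends if none matches. Pre_ excludes inputs where pairs of the run's list would make A raise (an empty pair, or a matching pair without a count slot), and the degenerate pair lists (several pairs for the same state, or a matching pair with extra trailing entries) on which A's rebuild-all behaviour and B's first-match in-place behaviour are both defensible.
-- outside the precondition, e.g. on addDist({1: [[2, 1], [2, 3]]}, 1, 2): A returns {1: [[2, 2], [2, 4]]}, B returns {1: [[2, 2], [2, 3]]}; on addDist({1: [[2, 5, 9]]}, 1, 2): A returns {1: [[2, 6]]}, B returns {1: [[2, 6, 9]]}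
import Mathlib
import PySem

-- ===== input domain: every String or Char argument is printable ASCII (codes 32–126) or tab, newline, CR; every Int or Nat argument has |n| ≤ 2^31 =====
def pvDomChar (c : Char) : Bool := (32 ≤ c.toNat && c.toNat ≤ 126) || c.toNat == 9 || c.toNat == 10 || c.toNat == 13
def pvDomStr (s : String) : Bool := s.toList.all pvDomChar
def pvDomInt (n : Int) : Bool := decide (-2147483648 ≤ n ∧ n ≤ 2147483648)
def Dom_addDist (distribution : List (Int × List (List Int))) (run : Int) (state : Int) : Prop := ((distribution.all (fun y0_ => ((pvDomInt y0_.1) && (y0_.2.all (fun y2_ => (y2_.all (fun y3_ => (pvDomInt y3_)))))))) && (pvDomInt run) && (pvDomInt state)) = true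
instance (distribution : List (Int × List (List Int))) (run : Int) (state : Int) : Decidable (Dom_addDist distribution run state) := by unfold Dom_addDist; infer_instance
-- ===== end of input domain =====

-- B changes the algorithm only: one early-returning pass over the run's pair list (increment
-- the first match in place, append if none) instead of A's existence-filter plus rebuild loop.
-- Both Pythons mutate `distribution`; the theorems are about the returned dict contents.

-- ===== PORT A =====
def addDist (distribution : List (Int × List (List Int))) (run : Int) (state : Int) : List (Int × List (List Int)) :=
  let d := PySem.Dict.mk distribution
  match d.get? run with
  | none => (d.insert run [[state, 1]]).items
  | some pairs =>
      -- x[0] is ported as headI: Pre_ excludes empty pairs (Python would raise IndexError)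
      let y := pairs.filter (fun x => x.headI == state)
      if y = [] then
        (d.insert run (pairs ++ [[state, 1]])).items
      else
        -- i[1] ported as getD 1 0: Pre_ guarantees a matching pair has length 2
        let tmp := pairs.foldl
          (fun acc i => if i.headI == state then acc ++ [[state, i.getD 1 0 + 1]] else acc ++ [i]) []
        (d.insert run tmp).items

-- ===== PORT B =====
-- one pass: increment the first pair whose head is `state` (in place), else append [state, 1]
def bumpPairs (state : Int) : List (List Int) → List (List Int)
  | [] => [[state, 1]]
  | p :: rest =>
      if p.headI == state then p.set 1 (p.getD 1 0 + 1) :: rest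
      else p :: bumpPairs state rest

def addDist_alt (distribution : List (Int × List (List Int))) (run : Int) (state : Int) : List (Int × List (List Int)) :=
  let d := PySem.Dict.mk distribution
  match d.get? run with
  | none => (d.insert run [[state, 1]]).items
  | some pairs => (d.insert run (bumpPairs state pairs)).items

-- ===== PRECONDITION & SPEC =====
-- Pre_ excludes inputs where A raises (an empty pair, or a matching pair with no second slot,
-- in the run's list), and defensible corners where A's value is accidental: several pairs for
-- the same state (A increments all, B the first) and a matching pair with trailing extra
-- entries (A rebuilds it to length 2, B keeps the extras).
def Pre_addDist (distribution : List (Int × List (List Int))) (run : Int) (state : Int) : Prop :=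
  (∀ p ∈ ((PySem.Dict.mk distribution).get? run).getD [], p ≠ [] ∧ (p.headI = state → p.length = 2)) ∧
  (((PySem.Dict.mk distribution).get? run).getD []).countP (fun p => p.headI == state) ≤ 1
instance (distribution : List (Int × List (List Int))) (run : Int) (state : Int) : Decidable (Pre_addDist distribution run state) := by unfold Pre_addDist; infer_instance

def pvWitness_addDist : (List (Int × List (List Int))) × Int × Int := ([(0, [[1, 2], [3, 4]])], 0, 1)

def Spec_addDist (distribution : List (Int × List (List Int))) (run : Int) (state : Int) (out : List (Int × List (List Int))) : Prop := out = addDist_alt distribution run state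
instance (distribution : List (Int × List (List Int))) (run : Int) (state : Int) (out : List (Int × List (List Int))) : Decidable (Spec_addDist distribution run state out) := by unfold Spec_addDist; infer_instance

-- ===== CLAIM (what is proved, stated in full; the proofs are below) =====
def Claim_equal_addDist : Prop := ∀ (distribution : List (Int × List (List Int))) (run : Int) (state : Int), Dom_addDist distribution run state → Pre_addDist distribution run state → Spec_addDist distribution run state (addDist distribution run state)

-- ===== LEMMAS AND PROOFS =====

-- A's rebuild loop is an append-map
lemma foldl_rebuild (state : Int) (l : List (List Int)) (acc : List (List Int)) :
    l.foldl (fun acc i => if i.headI == state then acc ++ [[state, i.getD 1 0 + 1]] else acc ++ [i]) acc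
      = acc ++ l.map (fun i => if i.headI == state then [state, i.getD 1 0 + 1] else i) := by
  induction l generalizing acc with
  | nil => simp
  | cons p rest ih =>
      simp only [List.foldl_cons, List.map_cons, ih]
      by_cases hp : p.headI == state <;> simp [hp]

-- core equality of the two pair-list updates under Pre_'s conditions
lemma core_eq (state : Int) (pairs : List (List Int))
    (h1 : ∀ p ∈ pairs, p ≠ [] ∧ (p.headI = state → p.length = 2))
    (h2 : pairs.countP (fun p => p.headI == state) ≤ 1) :
    (if pairs.filter (fun x => x.headI == state) = [] then pairs ++ [[state, 1]]
     else pairs.map (fun i => if i.headI == state then [state, i.getD 1 0 + 1] else i))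
      = bumpPairs state pairs := by
  induction pairs with
  | nil => simp [bumpPairs]
  | cons p rest ih =>
      by_cases hp : p.headI = state
      · have hfi : (p :: rest).filter (fun x => x.headI == state) ≠ [] := by
          simp [hp]
        rw [if_neg hfi]
        have hcount : rest.countP (fun p => p.headI == state) = 0 := by
          rw [List.countP_cons] at h2
          simp only [hp, beq_self_eq_true, if_true] at h2
          omega
        have hrest : ∀ i ∈ rest, ¬ (i.headI = state) := by
          intro i hi hih
          have := List.countP_eq_zero.mp hcount i hi
          simp [hih] at this
        obtain ⟨hne, hlen⟩ := h1 p (by simp)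
        have hl2 : p.length = 2 := hlen hp
        obtain ⟨a, b, htl⟩ : ∃ a b, p = [a, b] := by
          match p, hl2 with
          | [a, b], _ => exact ⟨a, b, rfl⟩
        subst htl
        have ha : a = state := by simpa using hp
        subst ha
        simp only [List.map_cons, bumpPairs, hp]
        simp only [beq_self_eq_true, if_true]
        congr 1
        have : ∀ i ∈ rest, (if (i.headI == a) = true then [a, i.getD 1 0 + 1] else i) = i := by
          intro i hi; simp [hrest i hi]
        rw [List.map_congr_left this]; exact List.map_id rest
      · have hpf : ((fun x => x.headI == state) p) = false := by simpa using hp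
        simp only [List.filter_cons, hpf, Bool.false_eq_true, if_false]
        simp only [bumpPairs, hpf, Bool.false_eq_true, if_false]
        have h1' : ∀ q ∈ rest, q ≠ [] ∧ (q.headI = state → q.length = 2) := fun q hq => h1 q (by simp [hq])
        have h2' : rest.countP (fun p => p.headI == state) ≤ 1 := by
          have := h2; simp [hpf] at this ⊢; omega
        have ihr := ih h1' h2'
        by_cases hf : rest.filter (fun x => x.headI == state) = []
        · rw [if_pos hf]
          rw [if_pos hf] at ihr
          simp [← ihr]
        · rw [if_neg hf]
          rw [if_neg hf] at ihr
          simp [List.map_cons, hp, ← ihr]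

-- ===== VERDICT (by name: the statement is the Claim_ definition above) =====
theorem addDist_spec : Claim_equal_addDist := by
  intro distribution run state _ hpre
  unfold Spec_addDist addDist addDist_alt
  obtain ⟨h1, h2⟩ := hpre
  cases hget : (PySem.Dict.mk distribution).get? run with
  | none => simp [hget]
  | some pairs =>
      simp only [hget] at h1 h2 ⊢
      simp only [Option.getD_some] at h1 h2
      rw [foldl_rebuild]
      simp only [List.nil_append]
      by_cases hf : pairs.filter (fun x => x.headI == state) = []
      · rw [if_pos hf]
        have := core_eq state pairs h1 h2
        rw [if_pos hf] at this
        rw [this]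
      · rw [if_neg hf]
        have := core_eq state pairs h1 h2
        rw [if_neg hf] at this
        rw [this]
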